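-- pv_equiv track=rewrite | github.com/henghonglee-menyala/csv-splitter | app.py | split_distinct_parts_decreasing
-- ===== SOURCE A (Python) =====
-- def split_distinct_parts_decreasing(amount, threshold):
--     parts = []
--     current = min(amount, threshold)
--
--     while amount > 0 and current > 0:
--         if amount - current >= 0:
--             parts.append(current)
--             amount -= current
--             current -= 1
--         else:
--             current = amount  # last part to cover remaining amount
--
--     if amount != 0:
--         # Could not split exactly with distinct parts <= threshold
--         return None
--
--     return parts
-- ===== SOURCE B (Python) =====
-- def split_distinct_parts_decreasing(amount, threshold):
--     if amount == 0:
--         return []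
--     if amount < 0 or threshold <= 0:
--         return None
--     s = min(amount, threshold)
--     if amount > s * (s + 1) // 2:
--         return None
--     # largest k in [0, s] with k*s - k*(k-1)//2 <= amount, by binary search
--     lo, hi = 0, s
--     while lo < hi:
--         mid = (lo + hi + 1) // 2
--         if mid * s - mid * (mid - 1) // 2 <= amount:
--             lo = mid
--         else:
--             hi = mid - 1
--     k = lo
--     r = amount - (k * s - k * (k - 1) // 2)
--     parts = list(range(s, s - k, -1))
--     if r > 0:
--         parts.append(r)
--     return parts
-- ===== Notes on version B (the rewrite author's own statement) =====
-- stated objective: alternative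
-- what changed: Replaces A's element-by-element subtraction loop with triangular-number arithmetic: a binary search for the number k of full descending parts followed by a single range(s, s-k, -1) construction plus the remainder.
import Mathlib
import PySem

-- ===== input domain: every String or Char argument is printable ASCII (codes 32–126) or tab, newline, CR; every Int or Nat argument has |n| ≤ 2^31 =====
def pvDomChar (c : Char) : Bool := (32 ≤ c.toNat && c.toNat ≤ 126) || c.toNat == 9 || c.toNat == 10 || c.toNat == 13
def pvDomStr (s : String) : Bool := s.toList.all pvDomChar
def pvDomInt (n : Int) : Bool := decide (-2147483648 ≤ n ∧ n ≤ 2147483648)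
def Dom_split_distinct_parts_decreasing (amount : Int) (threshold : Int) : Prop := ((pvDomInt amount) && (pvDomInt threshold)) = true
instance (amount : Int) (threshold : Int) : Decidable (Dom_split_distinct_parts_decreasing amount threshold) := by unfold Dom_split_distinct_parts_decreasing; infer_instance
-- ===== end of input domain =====

-- B replaces A's element-by-element subtraction loop by triangular-number arithmetic: a binary
-- search for the count k of full descending parts plus one range construction (objective: alternative).

-- ===== PORT A =====
-- A's while loop, step for step (parts/amount/current are the loop state).
def pvLoopA (amount : Int) (current : Int) (parts : List Int) : Option (List Int) :=
  if amount > 0 ∧ current > 0 then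
    if amount - current ≥ 0 then
      pvLoopA (amount - current) (current - 1) (parts ++ [current])
    else
      pvLoopA amount amount parts
  else if amount ≠ 0 then none else some parts
termination_by 2 * amount.toNat + (if amount < current then 1 else 0)
decreasing_by
  · split_ifs <;> omega
  · split_ifs <;> omega

def split_distinct_parts_decreasing (amount : Int) (threshold : Int) : Option (List Int) :=
  pvLoopA amount (min amount threshold) []

-- ===== PORT B =====
-- Source B's binary-search while loop: largest k in [lo, hi] with k*s - k*(k-1)//2 <= amount.
def pvBsearchB (amount : Int) (s : Int) (lo : Int) (hi : Int) : Int :=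
  if h : lo < hi then
    let mid := PySem.Int.floordiv (lo + hi + 1) 2
    if mid * s - PySem.Int.floordiv (mid * (mid - 1)) 2 ≤ amount then
      pvBsearchB amount s mid hi
    else
      pvBsearchB amount s lo (mid - 1)
  else lo
termination_by (hi - lo).toNat
decreasing_by
  · have hb := PySem.Int.floordiv_two_mid_bounds (lo := lo + 1) (hi := hi) (by omega)
    have he : lo + 1 + hi = lo + hi + 1 := by ring
    rw [he] at hb; omega
  · have hb := PySem.Int.floordiv_two_mid_bounds (lo := lo + 1) (hi := hi) (by omega)
    have he : lo + 1 + hi = lo + hi + 1 := by ring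
    rw [he] at hb; omega

def split_distinct_parts_decreasing_alt (amount : Int) (threshold : Int) : Option (List Int) :=
  if amount = 0 then some []
  else if amount < 0 ∨ threshold ≤ 0 then none
  else
    let s := min amount threshold
    if amount > PySem.Int.floordiv (s * (s + 1)) 2 then none
    else
      let k := pvBsearchB amount s 0 s
      let r := amount - (k * s - PySem.Int.floordiv (k * (k - 1)) 2)
      let parts := PySem.List.pyRange s (s - k) (-1)
      if r > 0 then some (parts ++ [r]) else some parts

-- ===== PRECONDITION & SPEC =====
def Spec_split_distinct_parts_decreasing (amount : Int) (threshold : Int) (out : Option (List Int)) : Prop := out = split_distinct_parts_decreasing_alt amount threshold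
instance (amount : Int) (threshold : Int) (out : Option (List Int)) : Decidable (Spec_split_distinct_parts_decreasing amount threshold out) := by unfold Spec_split_distinct_parts_decreasing; infer_instance

-- ===== CLAIM (what is proved, stated in full; the proofs are below) =====
def Claim_equal_split_distinct_parts_decreasing : Prop := ∀ (amount : Int) (threshold : Int), Dom_split_distinct_parts_decreasing amount threshold → Spec_split_distinct_parts_decreasing amount threshold (split_distinct_parts_decreasing amount threshold)

-- ===== LEMMAS AND PROOFS =====

-- partial sum of the descending run: fsum s k = s + (s-1) + ... + (s-k+1)  (for 0 ≤ k)
def pvFsum (s : Int) (k : Int) : Int := k * s - PySem.Int.floordiv (k * (k - 1)) 2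

lemma pvFsum_zero (s : Int) : pvFsum s 0 = 0 := by
  simp [pvFsum, PySem.Int.floordiv]

lemma pvFsum_succ (s k : Int) : pvFsum s (k + 1) = pvFsum s k + (s - k) := by
  unfold pvFsum
  rw [PySem.Int.floordiv_eq_ediv_of_pos (by norm_num), PySem.Int.floordiv_eq_ediv_of_pos (by norm_num)]
  have h : (k + 1) * ((k + 1) - 1) = k * (k - 1) + k * 2 := by ring
  rw [h, Int.add_mul_ediv_right _ _ (by norm_num : (2:Int) ≠ 0)]
  ring

lemma pvFsum_shift (s k : Int) : pvFsum (s - 1) k = pvFsum s (k + 1) - s := by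
  rw [pvFsum_succ]
  unfold pvFsum; ring

lemma pvTri_succ (s : Int) : PySem.Int.floordiv (s * (s + 1)) 2 = PySem.Int.floordiv ((s - 1) * s) 2 + s := by
  rw [PySem.Int.floordiv_eq_ediv_of_pos (by norm_num), PySem.Int.floordiv_eq_ediv_of_pos (by norm_num)]
  have h : s * (s + 1) = (s - 1) * s + s * 2 := by ring
  rw [h, Int.add_mul_ediv_right _ _ (by norm_num : (2:Int) ≠ 0)]

lemma pvFsum_ge_s (s : Int) : ∀ (k : Nat), 1 ≤ (k : Int) → (k : Int) ≤ s → s ≤ pvFsum s k := by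
  intro k
  induction k with
  | zero => intro h; simp at h
  | succ n ih =>
    intro _ hk
    push_cast
    rw [pvFsum_succ]
    by_cases hn : (n : Int) = 0
    · rw [hn, pvFsum_zero]; omega
    · have h1 : s ≤ pvFsum s n := ih (by omega) (by push_cast at hk; omega)
      push_cast at hk; omega

-- A's loop without the accumulator
def pvG (amount : Int) (current : Int) : Option (List Int) :=
  if amount > 0 ∧ current > 0 then
    if amount - current ≥ 0 then
      (pvG (amount - current) (current - 1)).map (current :: ·)
    else some [amount]
  else if amount ≠ 0 then none else some []
termination_by amount.toNat
decreasing_by omega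

lemma pvLoopA_eq_pvG (amount current : Int) (parts : List Int) :
    pvLoopA amount current parts = (pvG amount current).map (parts ++ ·) := by
  fun_induction pvLoopA amount current parts with
  | case1 amount current parts h hge ih =>
    rw [pvG, if_pos h, if_pos hge, ih]
    cases pvG (amount - current) (current - 1) <;> simp
  | case2 amount current parts h hge ih =>
    rw [ih]
    have hA : pvG amount current = some [amount] := by
      rw [pvG, if_pos h, if_neg hge]
    have hB : pvG amount amount = some [amount] := by
      rw [pvG, if_pos (⟨h.1, h.1⟩ : amount > 0 ∧ amount > 0),
        if_pos (by omega : amount - amount ≥ 0), pvG]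
      rw [if_neg (by omega : ¬(amount - amount > 0 ∧ amount - 1 > 0))]
      rw [if_neg (by omega : ¬(amount - amount ≠ 0))]
      rfl
    rw [hA, hB]
  | case3 amount current parts h hne =>
    rw [pvG, if_neg h, if_pos hne]
    rfl
  | case4 amount current parts h hne =>
    rw [pvG, if_neg h, if_neg hne]
    simp

lemma pvG_none : ∀ (n : Nat) (amount : Int),
    PySem.Int.floordiv ((n : Int) * ((n : Int) + 1)) 2 < amount → pvG amount (n : Int) = none := by
  intro n
  induction n with
  | zero =>
    intro amount h
    simp [PySem.Int.floordiv] at h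
    rw [pvG]
    rw [if_neg (by omega : ¬(amount > 0 ∧ ((0:Nat) : Int) > 0))]
    rw [if_pos (by simpa using by omega : ¬amount = 0)]
  | succ m ih =>
    intro amount h
    push_cast at h ⊢
    have hrw : PySem.Int.floordiv (((m:Int) + 1) * (((m:Int) + 1) + 1)) 2
        = PySem.Int.floordiv ((m:Int) * ((m:Int) + 1)) 2 + ((m:Int) + 1) := by
      rw [pvTri_succ]
      congr 2
      ring
    rw [show ((m:Int) + 1) * ((m:Int) + 1 + 1) = ((m:Int) + 1) * (((m:Int) + 1) + 1) from by ring,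
      hrw] at h
    have htri0 : 0 ≤ PySem.Int.floordiv ((m:Int) * ((m:Int) + 1)) 2 := by
      rw [PySem.Int.floordiv_eq_ediv_of_pos (by norm_num)]
      exact Int.ediv_nonneg (by positivity) (by norm_num)
    rw [pvG, if_pos (⟨by omega, by omega⟩ : amount > 0 ∧ (m:Int) + 1 > 0),
      if_pos (by omega : amount - ((m:Int) + 1) ≥ 0)]
    have hrec : pvG (amount - ((m:Int) + 1)) ((m:Int) + 1 - 1) = none := by
      rw [show (m:Int) + 1 - 1 = (m:Int) from by ring]
      exact ih (amount - ((m:Int) + 1)) (by omega)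
    rw [hrec]
    rfl

lemma pvG_char : ∀ (k : Nat) (s amount : Int), 0 ≤ amount → (k : Int) ≤ s →
    amount ≤ PySem.Int.floordiv (s * (s + 1)) 2 →
    pvFsum s (k : Int) ≤ amount → ((k : Int) = s ∨ amount < pvFsum s ((k : Int) + 1)) →
    pvG amount s = some (PySem.List.pyRange s (s - (k : Int)) (-1) ++
      (if amount - pvFsum s (k : Int) > 0 then [amount - pvFsum s (k : Int)] else [])) := by
  intro k
  induction k with
  | zero =>
    intro s amount ha hks hT hf hup
    simp only [Nat.cast_zero, pvFsum_zero, sub_zero] at *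
    rw [PySem.List.pyRange_neg_one_eq_nil (le_refl s)]
    by_cases h0 : amount = 0
    · subst h0
      rw [pvG]; simp
    · -- amount > 0; s = 0 is impossible (amount ≤ T = 0)
      have hpos : 0 < amount := by omega
      have hsa : amount < s := by
        rcases hup with h | h
        · exfalso
          rw [← h] at hT
          simp [PySem.Int.floordiv] at hT
          omega
        · have h1 := pvFsum_succ s 0
          rw [pvFsum_zero] at h1
          omega
      rw [pvG]
      have hc : amount > 0 ∧ s > 0 := by constructor <;> omega
      rw [if_pos hc, if_neg (by omega : ¬(amount - s ≥ 0))]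
      simp [hpos]
  | succ m ih =>
    intro s amount ha hks hT hf hup
    push_cast at hks hf hup ⊢
    have hs1 : 1 ≤ s := by omega
    have hsle : s ≤ pvFsum s ((m : Int) + 1) := by
      have := pvFsum_ge_s s (m + 1) (by push_cast; omega) (by push_cast; omega)
      push_cast at this; exact this
    have hamt : s ≤ amount := le_trans hsle hf
    rw [pvG]
    have hc : amount > 0 ∧ s > 0 := by constructor <;> omega
    rw [if_pos hc, if_pos (by omega : amount - s ≥ 0)]
    have ihx := ih (s - 1) (amount - s) (by omega) (by omega)
      (by rw [pvTri_succ] at hT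
          rw [show (s-1) * ((s-1) + 1) = (s-1) * s from by ring]
          omega)
      (by rw [pvFsum_shift]; omega)
      (by rcases hup with h | h
          · left; omega
          · right; rw [pvFsum_shift]; push_cast; omega)
    rw [ihx]
    have hr : amount - s - pvFsum (s - 1) (m : Int) = amount - pvFsum s ((m : Int) + 1) := by
      rw [pvFsum_shift]; ring
    rw [hr]
    have hrange : PySem.List.pyRange s (s - ((m : Int) + 1)) (-1)
        = s :: PySem.List.pyRange (s - 1) (s - 1 - (m : Int)) (-1) := by
      rw [PySem.List.pyRange_neg_one_cons (by omega : s - ((m : Int) + 1) < s)]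
      congr 1
      congr 1
      ring
    simp only [Option.map_some]
    rw [hrange]
    simp

lemma pvBsearchB_spec (amount s : Int) : ∀ (lo hi : Int), 0 ≤ lo → lo ≤ hi → hi ≤ s →
    pvFsum s lo ≤ amount → (hi = s ∨ amount < pvFsum s (hi + 1)) →
    (0 ≤ pvBsearchB amount s lo hi ∧ pvBsearchB amount s lo hi ≤ s ∧
     pvFsum s (pvBsearchB amount s lo hi) ≤ amount ∧
     (pvBsearchB amount s lo hi = s ∨ amount < pvFsum s (pvBsearchB amount s lo hi + 1))) := by
  intro lo hi
  fun_induction pvBsearchB amount s lo hi with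
  | case1 lo hi h mid hcond ih =>
    intro h0 hlh hhs hf hup
    have hmid : mid = PySem.Int.floordiv (lo + hi + 1) 2 := rfl
    have hb := PySem.Int.floordiv_two_mid_bounds (lo := lo + 1) (hi := hi) (by omega)
    have he : lo + 1 + hi = lo + hi + 1 := by ring
    rw [he, ← hmid] at hb
    exact ih (by omega) (by omega) hhs hcond hup
  | case2 lo hi h mid hcond ih =>
    intro h0 hlh hhs hf hup
    have hmid : mid = PySem.Int.floordiv (lo + hi + 1) 2 := rfl
    have hb := PySem.Int.floordiv_two_mid_bounds (lo := lo + 1) (hi := hi) (by omega)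
    have he : lo + 1 + hi = lo + hi + 1 := by ring
    rw [he, ← hmid] at hb
    refine ih h0 (by omega) (by omega) hf (Or.inr ?_)
    rw [show mid - 1 + 1 = mid from by ring]
    have hx : pvFsum s mid = mid * s - PySem.Int.floordiv (mid * (mid - 1)) 2 := rfl
    omega
  | case3 lo hi h =>
    intro h0 hlh hhs hf hup
    have hlohi : lo = hi := by omega
    subst hlohi
    exact ⟨h0, hhs, hf, hup⟩

-- ===== VERDICT (by name: the statement is the Claim_ definition above) =====
theorem split_distinct_parts_decreasing_spec : Claim_equal_split_distinct_parts_decreasing := by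
  intro amount threshold _
  unfold Spec_split_distinct_parts_decreasing
  unfold split_distinct_parts_decreasing split_distinct_parts_decreasing_alt
  rw [pvLoopA_eq_pvG]
  by_cases h0 : amount = 0
  · subst h0
    rw [pvG]
    simp
  · rw [if_neg h0]
    by_cases hneg : amount < 0 ∨ threshold ≤ 0
    · rw [if_pos hneg]
      rw [pvG]
      have hc : ¬(amount > 0 ∧ min amount threshold > 0) := by
        rcases hneg with h | h
        · omega
        · intro ⟨_, hm⟩; omega
      rw [if_neg hc, if_pos h0]
      rfl
    · rw [if_neg hneg]
      push_neg at hneg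
      have hapos : 0 < amount := by omega
      have htpos : 0 < threshold := hneg.2
      set s := min amount threshold with hs
      have hspos : 0 < s := by omega
      by_cases hT : amount > PySem.Int.floordiv (s * (s + 1)) 2
      · rw [if_pos hT]
        have := pvG_none s.toNat amount
          (by rw [Int.toNat_of_nonneg (by omega)]; omega)
        rw [Int.toNat_of_nonneg (by omega)] at this
        rw [this]; rfl
      · rw [if_neg hT]
        push_neg at hT
        have hspec := pvBsearchB_spec amount s 0 s (le_refl 0) (by omega) (le_refl s)
          (by rw [pvFsum_zero]; omega) (Or.inl rfl)
        set k := pvBsearchB amount s 0 s with hk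
        obtain ⟨hk0, hks, hkf, hkup⟩ := hspec
        have hkcast : ((k.toNat : Int)) = k := Int.toNat_of_nonneg hk0
        have hchar := pvG_char k.toNat s amount (by omega) (by rw [hkcast]; exact hks) hT
          (by rw [hkcast]; exact hkf) (by rw [hkcast]; exact hkup)
        rw [hkcast] at hchar
        rw [hchar]
        have hrdef : amount - (k * s - PySem.Int.floordiv (k * (k - 1)) 2) = amount - pvFsum s k := rfl
        simp only [hrdef]
        by_cases hr : amount - pvFsum s k > 0
        · rw [if_pos hr, if_pos hr]
          simp
        · rw [if_neg hr, if_neg hr, List.append_nil]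
          simp
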